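-- pv_equiv track=rewrite | github.com/mugayoshi/LogParser | EliminateTags.py | makeSentence
-- ===== SOURCE A (Python) =====
-- def  makeSentence(line):
--     if line.find('Modify'):
--         if (line.find('ID') == -1 and line.find('CLASS') == -1):
--             return ''
--         arry = line.split(':')
--         hasID = 0
--         method_top = 0
--         log = ''
--         string = []
--         for x in arry:
--
--             if x.find('ID') != -1:
--                 hasID = 1
--
--             elif x.find('CLASS') != -1:
--                 method_top = 1;
--
--             if (hasID == 1 or method_top == 1):
--                 log += x
--
--         return log
--     else:
--         return ''
-- ===== SOURCE B (Python) =====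
-- def makeSentence(line):
--     if line.find('Modify') == 0:
--         return ''
--     if 'ID' not in line and 'CLASS' not in line:
--         return ''
--     arry = line.split(':')
--     for i, x in enumerate(arry):
--         if 'ID' in x or 'CLASS' in x:
--             return ''.join(arry[i:])
--     return ''
-- ===== Notes on version B (the rewrite author's own statement) =====
-- stated objective: simpler
-- what changed: Replaces A's sticky-flag fold that accumulates the output string token by token with early-return guards plus find-the-first-tagged-token-then-join-the-suffix; no flag state is threaded.
import Mathlib
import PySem

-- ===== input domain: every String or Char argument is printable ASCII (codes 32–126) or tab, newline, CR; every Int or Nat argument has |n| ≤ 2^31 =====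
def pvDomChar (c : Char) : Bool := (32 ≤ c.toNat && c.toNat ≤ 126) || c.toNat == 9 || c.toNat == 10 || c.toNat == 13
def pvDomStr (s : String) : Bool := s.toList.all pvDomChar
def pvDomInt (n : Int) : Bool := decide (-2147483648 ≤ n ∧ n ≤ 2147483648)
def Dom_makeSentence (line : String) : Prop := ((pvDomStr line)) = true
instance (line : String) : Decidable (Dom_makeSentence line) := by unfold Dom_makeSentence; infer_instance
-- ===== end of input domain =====

-- B is a simpler decomposition of the same task: guard, then find the first ':'-token containing
-- 'ID'/'CLASS' and join the suffix from it, instead of A's sticky-flag accumulation over the pass.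

-- ===== PORT A =====
-- A's loop body: update hasID / method_top (the if/elif), then append x when a flag is 1.
def pvStep (st : List Char × Int × Int) (x : List Char) : List Char × Int × Int :=
  let hasID : Int := if PySem.Chars.find x "ID".toList ≠ -1 then 1 else st.2.1
  let methodTop : Int :=
    if PySem.Chars.find x "ID".toList ≠ -1 then st.2.2
    else if PySem.Chars.find x "CLASS".toList ≠ -1 then 1 else st.2.2
  if hasID = 1 ∨ methodTop = 1 then (st.1 ++ x, hasID, methodTop)
  else (st.1, hasID, methodTop)

-- Literal transliteration of A: the truthy 'if line.find('Modify'):', the two == -1 tests,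
-- split on ':', then the fold over (log, hasID, method_top) starting from ('', 0, 0).
def makeSentence (line : String) : String :=
  if PySem.Str.find line "Modify" ≠ 0 then
    if PySem.Str.find line "ID" = -1 ∧ PySem.Str.find line "CLASS" = -1 then ""
    else
      let arry := PySem.Chars.splitOn line.toList ":".toList
      String.ofList (arry.foldl pvStep ([], 0, 0)).1
  else ""

-- ===== PORT B =====
-- B's loop 'for i, x in enumerate(arry): if tag in x: return ''.join(arry[i:])' as structural
-- recursion returning the suffix from the first tagged token ([] if none, like B's final return '').
def pvTagSuffix : List (List Char) → List (List Char)
  | [] => []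
  | x :: xs =>
    if PySem.Chars.isIn "ID".toList x || PySem.Chars.isIn "CLASS".toList x then x :: xs
    else pvTagSuffix xs

def makeSentence_alt (line : String) : String :=
  if PySem.Str.find line "Modify" = 0 then ""
  else if !(PySem.Str.isIn "ID" line) && !(PySem.Str.isIn "CLASS" line) then ""
  else String.ofList (PySem.Chars.join [] (pvTagSuffix (PySem.Chars.splitOn line.toList ":".toList)))

-- ===== PRECONDITION & SPEC =====
def Spec_makeSentence (line : String) (out : String) : Prop := out = makeSentence_alt line
instance (line : String) (out : String) : Decidable (Spec_makeSentence line out) := by unfold Spec_makeSentence; infer_instance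

-- ===== CLAIM (what is proved, stated in full; the proofs are below) =====
def Claim_equal_makeSentence : Prop := ∀ (line : String), Dom_makeSentence line → Spec_makeSentence line (makeSentence line)

-- ===== LEMMAS AND PROOFS =====

-- ''.join is concatenation
theorem pv_join_nil_eq_flatten (l : List (List Char)) :
    PySem.Chars.join [] l = l.flatten := by
  induction l with
  | nil => simp [PySem.Chars.join_nil]
  | cons p rest ih =>
    cases rest with
    | nil => simp [PySem.Chars.join_singleton]
    | cons q r => simp [PySem.Chars.join_cons_cons, ih]

-- a token is tagged: A's find ≠ -1 test ↔ B's 'in' test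
theorem pv_tag_iff (x : List Char) :
    (PySem.Chars.find x ['I', 'D'] ≠ -1 ∨ PySem.Chars.find x ['C', 'L', 'A', 'S', 'S'] ≠ -1) ↔
    (PySem.Chars.isIn ['I', 'D'] x || PySem.Chars.isIn ['C', 'L', 'A', 'S', 'S'] x) = true := by
  simp [PySem.Chars.find_ne_neg_one_iff, PySem.Chars.isIn_iff_infix]

-- once a flag is set, A's fold appends every remaining token
theorem pv_sticky (l : List (List Char)) : ∀ (log : List Char) (h m : Int),
    h = 1 ∨ m = 1 → (l.foldl pvStep (log, h, m)).1 = log ++ l.flatten := by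
  induction l with
  | nil => intro log h m _; simp
  | cons x xs ih =>
    intro log h m hm
    by_cases hid : PySem.Chars.find x ['I', 'D'] = -1
    · by_cases hcl : PySem.Chars.find x ['C', 'L', 'A', 'S', 'S'] = -1
      · have hstep : pvStep (log, h, m) x = (log ++ x, h, m) := by simp [pvStep, hid, hcl, hm]
        rw [List.foldl_cons, hstep, ih (log ++ x) h m hm]
        simp
      · have hstep : pvStep (log, h, m) x = (log ++ x, h, 1) := by simp [pvStep, hid, hcl]
        rw [List.foldl_cons, hstep, ih (log ++ x) h 1 (Or.inr rfl)]
        simp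
    · have hstep : pvStep (log, h, m) x = (log ++ x, 1, m) := by simp [pvStep, hid]
      rw [List.foldl_cons, hstep, ih (log ++ x) 1 m (Or.inl rfl)]
      simp

-- from the initial (0, 0) state, A's fold computes exactly B's suffix concatenation
theorem pv_fold_eq_suffix (l : List (List Char)) (log : List Char) :
    (l.foldl pvStep (log, 0, 0)).1 = log ++ (pvTagSuffix l).flatten := by
  induction l generalizing log with
  | nil => simp [pvTagSuffix]
  | cons x xs ih =>
    by_cases hid : PySem.Chars.find x ['I', 'D'] = -1
    · by_cases hcl : PySem.Chars.find x ['C', 'L', 'A', 'S', 'S'] = -1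
      · have hb : (PySem.Chars.isIn ['I', 'D'] x || PySem.Chars.isIn ['C', 'L', 'A', 'S', 'S'] x) = false := by
          by_contra hc
          simp only [Bool.not_eq_false] at hc
          rcases (pv_tag_iff x).mpr hc with h | h
          · exact h hid
          · exact h hcl
        have hstep : pvStep (log, 0, 0) x = (log, 0, 0) := by simp [pvStep, hid, hcl]
        rw [List.foldl_cons, hstep, ih log]
        simp [pvTagSuffix, hb]
      · have hb := (pv_tag_iff x).mp (Or.inr hcl)
        have hstep : pvStep (log, 0, 0) x = (log ++ x, 0, 1) := by simp [pvStep, hid, hcl]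
        rw [List.foldl_cons, hstep, pv_sticky xs (log ++ x) 0 1 (Or.inr rfl)]
        simp [pvTagSuffix, hb]
    · have hb := (pv_tag_iff x).mp (Or.inl hid)
      have hstep : pvStep (log, 0, 0) x = (log ++ x, 1, 0) := by simp [pvStep, hid]
      rw [List.foldl_cons, hstep, pv_sticky xs (log ++ x) 1 0 (Or.inl rfl)]
      simp [pvTagSuffix, hb]

-- the '-1 guard vs in-guard' agreement, per tag
theorem pv_guard_iffI (line : String) :
    (PySem.Chars.isIn ['I', 'D'] line.toList = false) ↔
    (PySem.Chars.find line.toList ['I', 'D'] = -1) := by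
  rw [PySem.Chars.isIn_eq_false_iff, PySem.Chars.find_eq_neg_one_iff]

theorem pv_guard_iffC (line : String) :
    (PySem.Chars.isIn ['C', 'L', 'A', 'S', 'S'] line.toList = false) ↔
    (PySem.Chars.find line.toList ['C', 'L', 'A', 'S', 'S'] = -1) := by
  rw [PySem.Chars.isIn_eq_false_iff, PySem.Chars.find_eq_neg_one_iff]

-- ===== VERDICT (by name: the statement is the Claim_ definition above) =====
theorem makeSentence_spec : Claim_equal_makeSentence := by
  intro line _
  unfold Spec_makeSentence makeSentence makeSentence_alt
  simp only [PySem.Str.find_eq, PySem.Str.isIn_eq, ne_eq]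
  have hM : "Modify".toList = ['M', 'o', 'd', 'i', 'f', 'y'] := rfl
  have hD : "ID".toList = ['I', 'D'] := rfl
  have hS : "CLASS".toList = ['C', 'L', 'A', 'S', 'S'] := rfl
  simp only [hM, hD, hS]
  by_cases h0 : PySem.Chars.find line.toList ['M', 'o', 'd', 'i', 'f', 'y'] = 0
  · simp [h0]
  · rw [if_pos h0, if_neg h0]
    by_cases hI : PySem.Chars.isIn ['I', 'D'] line.toList = false <;>
      by_cases hC : PySem.Chars.isIn ['C', 'L', 'A', 'S', 'S'] line.toList = false
    · rw [if_pos ⟨(pv_guard_iffI line).mp hI, (pv_guard_iffC line).mp hC⟩,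
          if_pos (by simp [hI, hC])]
    · have hf : ¬ PySem.Chars.find line.toList ['C', 'L', 'A', 'S', 'S'] = -1 :=
        fun h => hC ((pv_guard_iffC line).mpr h)
      rw [if_neg (fun hg => hf hg.2), if_neg (by simp [hC])]
      simp [pv_fold_eq_suffix, pv_join_nil_eq_flatten]
    · have hf : ¬ PySem.Chars.find line.toList ['I', 'D'] = -1 :=
        fun h => hI ((pv_guard_iffI line).mpr h)
      rw [if_neg (fun hg => hf hg.1), if_neg (by simp [hI])]
      simp [pv_fold_eq_suffix, pv_join_nil_eq_flatten]
    · have hf : ¬ PySem.Chars.find line.toList ['I', 'D'] = -1 :=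
        fun h => hI ((pv_guard_iffI line).mpr h)
      rw [if_neg (fun hg => hf hg.1), if_neg (by simp [hI])]
      simp [pv_fold_eq_suffix, pv_join_nil_eq_flatten]
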